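-- pv_equiv track=rewrite | github.com/Vortex1347/Backend_api_tests | new_processing_transfer_suite/support/live_runner.py | _extract_visible_pan_edges
-- ===== SOURCE A (Python) =====
-- def _extract_visible_pan_edges(masked_pan: str | None) -> tuple[str, str]:
--     prepared = "".join(char for char in masked_pan or "" if char.isdigit() or char == "*")
--
--     prefix = []
--     for char in prepared:
--         if char.isdigit():
--             prefix.append(char)
--             continue
--         break
--
--     suffix = []
--     for char in reversed(prepared):
--         if char.isdigit():
--             suffix.append(char)
--             continue
--         break
--
--     return "".join(prefix), "".join(reversed(suffix))
-- ===== SOURCE B (Python) =====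
-- def _extract_visible_pan_edges(masked_pan):
--     prepared = "".join(char for char in masked_pan or "" if char.isdigit() or char == "*")
--     segments = prepared.split("*")
--     return segments[0], segments[-1]
-- ===== Notes on version B (the rewrite author's own statement) =====
-- stated objective: simpler
-- what changed: Replaces the two early-breaking scan loops (forward and over reversed(prepared)) with a single split on '*' of the filtered string, returning its first and last segments.
import Mathlib
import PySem

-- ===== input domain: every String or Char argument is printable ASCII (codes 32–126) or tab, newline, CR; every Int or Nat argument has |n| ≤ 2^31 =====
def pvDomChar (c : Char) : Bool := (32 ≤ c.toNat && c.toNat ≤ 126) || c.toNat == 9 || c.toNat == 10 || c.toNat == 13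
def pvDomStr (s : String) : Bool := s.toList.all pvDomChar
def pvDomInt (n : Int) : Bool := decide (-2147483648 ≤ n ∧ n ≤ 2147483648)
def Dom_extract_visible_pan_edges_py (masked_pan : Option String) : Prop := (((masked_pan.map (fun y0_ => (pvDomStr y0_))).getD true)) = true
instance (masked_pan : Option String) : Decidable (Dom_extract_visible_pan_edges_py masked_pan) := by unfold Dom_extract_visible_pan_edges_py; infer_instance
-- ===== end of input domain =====

-- B replaces A's two early-breaking scan loops with one split on '*' of the filtered string,
-- returning the first and last segments (simpler decomposition, same cost).


-- ===== PORT A =====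
-- A's two loops are the same code (append digits, break at the first non-digit);
-- this helper is that loop, used once forward and once on the reversed list.
def pvTakeDigitsA : List Char → List Char
  | [] => []
  | c :: rest => if PySem.Chars.isdigit c then c :: pvTakeDigitsA rest else []

def extract_visible_pan_edges_py (masked_pan : Option String) : String × String :=
  let prepared := (masked_pan.getD "").toList.filter (fun c => PySem.Chars.isdigit c || c == '*')
  let pre := pvTakeDigitsA prepared
  let suf := pvTakeDigitsA prepared.reverse
  (String.ofList pre, String.ofList suf.reverse)

-- ===== PORT B =====
def extract_visible_pan_edges_py_alt (masked_pan : Option String) : String × String :=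
  let prepared := (masked_pan.getD "").toList.filter (fun c => PySem.Chars.isdigit c || c == '*')
  let segments := PySem.Chars.splitOn prepared ['*']
  (String.ofList (PySem.List.pyGetD segments 0 []), String.ofList (PySem.List.pyGetD segments (-1) []))

-- ===== PRECONDITION & SPEC =====
def Spec_extract_visible_pan_edges_py (masked_pan : Option String) (out : String × String) : Prop := out = extract_visible_pan_edges_py_alt masked_pan
instance (masked_pan : Option String) (out : String × String) : Decidable (Spec_extract_visible_pan_edges_py masked_pan out) := by unfold Spec_extract_visible_pan_edges_py; infer_instance

-- ===== CLAIM (what is proved, stated in full; the proofs are below) =====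
def Claim_equal_extract_visible_pan_edges_py : Prop := ∀ (masked_pan : Option String), Dom_extract_visible_pan_edges_py masked_pan → Spec_extract_visible_pan_edges_py masked_pan (extract_visible_pan_edges_py masked_pan)

-- ===== LEMMAS AND PROOFS =====

-- the simple structural form of splitOn on the single-char separator '*'
def pvSplitStar (pre : List Char) : List Char → List (List Char)
  | [] => [pre]
  | c :: rest => if c = '*' then pre :: pvSplitStar [] rest else pvSplitStar (pre ++ [c]) rest

-- the segment before the first '*'
def pvTakeStar : List Char → List Char
  | [] => []
  | c :: rest => if c = '*' then [] else c :: pvTakeStar rest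

theorem pvSplitStar_ne_nil (pre cs : List Char) : pvSplitStar pre cs ≠ [] := by
  induction cs generalizing pre with
  | nil => simp [pvSplitStar]
  | cons c rest ih => by_cases h : c = '*' <;> simp [pvSplitStar, h, ih]

theorem pvGo_spec (fuel : Nat) (cs cur : List Char) (acc : List (List Char))
    (h : cs.length < fuel) :
    PySem.Chars.splitOn.go ['*'] fuel cs cur acc = acc.reverse ++ pvSplitStar cur.reverse cs := by
  induction fuel generalizing cs cur acc with
  | zero => omega
  | succ fuel ih =>
    cases cs with
    | nil => rw [PySem.Chars.splitOn.go.eq_def]; simp [pvSplitStar]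
    | cons c rest =>
      by_cases hc : c = '*'
      · subst hc
        have hp : List.isPrefixOf ['*'] ('*' :: rest) = true := by simp [List.isPrefixOf]
        rw [PySem.Chars.splitOn.go.eq_def]
        simp only [hp, if_true]
        rw [show List.drop (['*'] : List Char).length ('*' :: rest) = rest from rfl]
        rw [ih rest [] ((cur.reverse) :: acc) (by simpa using Nat.lt_of_succ_lt_succ h)]
        simp [pvSplitStar]
      · have hp : List.isPrefixOf ['*'] (c :: rest) = false := by
          simp [List.isPrefixOf]
          intro h'; exact (hc h'.symm)
        rw [PySem.Chars.splitOn.go.eq_def]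
        simp only [hp]
        rw [if_neg (by simp)]
        rw [ih rest (c :: cur) acc (by simpa using Nat.lt_of_succ_lt_succ h)]
        simp [pvSplitStar, hc]

theorem pvSplitOn_eq (cs : List Char) : PySem.Chars.splitOn cs ['*'] = pvSplitStar [] cs := by
  unfold PySem.Chars.splitOn
  simpa using pvGo_spec (cs.length + 1) cs [] [] (by omega)

theorem pvSplitStar_head (pre cs : List Char) :
    (pvSplitStar pre cs).head? = some (pre ++ pvTakeStar cs) := by
  induction cs generalizing pre with
  | nil => simp [pvSplitStar, pvTakeStar]
  | cons c rest ih =>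
    by_cases h : c = '*'
    · simp [pvSplitStar, pvTakeStar, h]
    · simp [pvSplitStar, pvTakeStar, h, ih]

theorem pvTakeStar_append_of_mem (x y : List Char) (h : '*' ∈ x) :
    pvTakeStar (x ++ y) = pvTakeStar x := by
  induction x with
  | nil => simp at h
  | cons c rest ih =>
    by_cases hc : c = '*'
    · simp [pvTakeStar, hc]
    · have : '*' ∈ rest := by
        rcases List.mem_cons.mp h with h' | h'
        · exact absurd h'.symm hc
        · exact h'
      simp [pvTakeStar, hc, ih this]

theorem pvTakeStar_of_not_mem (x : List Char) (h : '*' ∉ x) : pvTakeStar x = x := by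
  induction x with
  | nil => simp [pvTakeStar]
  | cons c rest ih =>
    have hc : c ≠ '*' := fun e => h (by simp [e])
    have hr : '*' ∉ rest := fun m => h (by simp [m])
    simp [pvTakeStar, hc, ih hr]

theorem pvTakeStar_append_of_not_mem (x y : List Char) (h : '*' ∉ x) :
    pvTakeStar (x ++ y) = x ++ pvTakeStar y := by
  induction x with
  | nil => simp
  | cons c rest ih =>
    have hc : c ≠ '*' := fun e => h (by simp [e])
    have hr : '*' ∉ rest := fun m => h (by simp [m])
    simp [pvTakeStar, hc, ih hr]

theorem pvSplitStar_getLast (pre cs : List Char) :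
    (pvSplitStar pre cs).getLast? =
      some (if '*' ∈ cs then (pvTakeStar cs.reverse).reverse else pre ++ cs) := by
  induction cs generalizing pre with
  | nil => simp [pvSplitStar]
  | cons c rest ih =>
    by_cases hc : c = '*'
    · subst hc
      have hne := pvSplitStar_ne_nil ([] : List Char) rest
      obtain ⟨a, as, e⟩ := List.exists_cons_of_ne_nil hne
      rw [show pvSplitStar pre ('*' :: rest) = pre :: pvSplitStar [] rest from by simp [pvSplitStar]]
      rw [e, List.getLast?_cons_cons, ← e, ih []]
      by_cases hr : '*' ∈ rest
      · have : pvTakeStar (rest.reverse ++ ['*']) = pvTakeStar rest.reverse :=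
          pvTakeStar_append_of_mem _ _ (by simpa using hr)
        simp [hr, this]
      · have hnr : '*' ∉ rest.reverse := by simpa using hr
        have : pvTakeStar (rest.reverse ++ ['*']) = rest.reverse ++ pvTakeStar ['*'] :=
          pvTakeStar_append_of_not_mem _ _ hnr
        simp [hr, this, pvTakeStar]
    · have hsub : '*' ∈ c :: rest ↔ '*' ∈ rest := by
        constructor
        · intro h; rcases List.mem_cons.mp h with h' | h'
          · exact absurd h'.symm hc
          · exact h'
        · intro h; exact List.mem_cons_of_mem _ h
      rw [pvSplitStar]
      simp only [if_neg hc]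
      rw [ih (pre ++ [c])]
      by_cases hr : '*' ∈ rest
      · have : pvTakeStar (rest.reverse ++ [c]) = pvTakeStar rest.reverse :=
          pvTakeStar_append_of_mem _ _ (by simpa using hr)
        simp [hr, hsub, this]
      · simp [hr, hsub]

theorem pvTakeDigits_eq_takeStar (cs : List Char)
    (h : ∀ c ∈ cs, PySem.Chars.isdigit c || c == '*') :
    pvTakeDigitsA cs = pvTakeStar cs := by
  induction cs with
  | nil => rfl
  | cons c rest ih =>
    have hc := h c (by simp)
    by_cases hd : PySem.Chars.isdigit c = true
    · have hne : c ≠ '*' := by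
        intro e; rw [e] at hd; simp [PySem.Chars.isdigit] at hd
      simp [pvTakeDigitsA, pvTakeStar, hd, hne, ih (fun x hx => h x (by simp [hx]))]
    · have he : c = '*' := by
        simp [hd] at hc; exact hc
      simp [pvTakeDigitsA, pvTakeStar, he]
      decide

theorem pvMain (cs : List Char) (hall : ∀ c ∈ cs, PySem.Chars.isdigit c || c == '*') :
    ((String.ofList (pvTakeDigitsA cs), String.ofList (pvTakeDigitsA cs.reverse).reverse) : String × String)
      = (String.ofList (PySem.List.pyGetD (PySem.Chars.splitOn cs ['*']) 0 []),
         String.ofList (PySem.List.pyGetD (PySem.Chars.splitOn cs ['*']) (-1) [])) := by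
  rw [pvSplitOn_eq]
  have hne := pvSplitStar_ne_nil ([] : List Char) cs
  have hallrev : ∀ c ∈ cs.reverse, PySem.Chars.isdigit c || c == '*' := by
    intro c hc; exact hall c (by simpa using hc)
  have h1 : PySem.List.pyGetD (pvSplitStar [] cs) 0 [] = pvTakeStar cs := by
    have hh := pvSplitStar_head [] cs
    obtain ⟨a, as, e⟩ := List.exists_cons_of_ne_nil hne
    rw [e] at hh ⊢
    simp at hh
    rw [PySem.List.pyGetD_zero_cons, hh]
  have h2 : PySem.List.pyGetD (pvSplitStar [] cs) (-1) [] = (pvTakeStar cs.reverse).reverse := by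
    rw [PySem.List.pyGetD_neg_one _ _ hne]
    have hg := pvSplitStar_getLast [] cs
    by_cases hm : '*' ∈ cs
    · simp only [hm, if_pos] at hg
      rw [List.getLast?_eq_getLast hne] at hg
      exact Option.some.inj hg
    · simp only [hm, List.nil_append, if_false] at hg
      rw [List.getLast?_eq_getLast hne] at hg
      have hns : '*' ∉ cs.reverse := by simpa using hm
      rw [pvTakeStar_of_not_mem _ hns]
      simpa using Option.some.inj hg
  rw [h1, h2, pvTakeDigits_eq_takeStar cs hall, pvTakeDigits_eq_takeStar cs.reverse hallrev]

-- ===== VERDICT (by name: the statement is the Claim_ definition above) =====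
theorem extract_visible_pan_edges_py_spec : Claim_equal_extract_visible_pan_edges_py := by
  intro masked_pan _
  unfold Spec_extract_visible_pan_edges_py extract_visible_pan_edges_py extract_visible_pan_edges_py_alt
  exact pvMain _ (fun c hc => (List.mem_filter.mp hc).2)
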